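-- pv_equiv track=rewrite | github.com/dselig11235/cso | ita/text_matching.py | str2words
-- ===== SOURCE A (Python) =====
-- from string import ascii_lowercase
--
-- def str2words(s):
--     # is, are, by, in?
--     stoplist = set('a an of the and or to for on'.split())
--     chars = []
--     for c in s.lower():
--         if c in ascii_lowercase:
--             chars.append(c)
--         else:
--             chars.append(' ')
--     s = ''.join(chars)
--     return [word for word in s.split() if word not in stoplist]
-- ===== SOURCE B (Python) =====
-- def str2words(s):
--     stoplist = {'a', 'an', 'of', 'the', 'and', 'or', 'to', 'for', 'on'}
--     low = s.lower()
--     n = len(low)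
--     words = []
--     i = 0
--     while i < n:
--         if 'a' <= low[i] <= 'z':
--             j = i + 1
--             while j < n and 'a' <= low[j] <= 'z':
--                 j += 1
--             w = low[i:j]
--             if w not in stoplist:
--                 words.append(w)
--             i = j
--         else:
--             i += 1
--     return words
-- ===== Notes on version B (the rewrite author's own statement) =====
-- stated objective: alternative
-- what changed: B never builds the intermediate space-substituted character list / joined string: it scans the lowered string once with two indices, slicing out each maximal a-z run and filtering stopwords inline, instead of A's char-by-char substitution followed by join and split.
import Mathlib
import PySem

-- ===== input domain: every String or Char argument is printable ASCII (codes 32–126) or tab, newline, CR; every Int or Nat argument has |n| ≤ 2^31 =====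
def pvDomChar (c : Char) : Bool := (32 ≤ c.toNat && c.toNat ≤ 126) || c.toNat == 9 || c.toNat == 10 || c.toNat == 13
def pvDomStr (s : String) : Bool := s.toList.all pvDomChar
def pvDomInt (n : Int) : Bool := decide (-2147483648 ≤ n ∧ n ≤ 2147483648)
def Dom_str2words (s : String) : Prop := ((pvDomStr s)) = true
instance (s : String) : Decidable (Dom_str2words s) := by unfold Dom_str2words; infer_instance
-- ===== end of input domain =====

-- B replaces A's char-substitution + join + split pipeline by a single two-index scan
-- extracting maximal a-z runs and filtering stopwords inline (objective: alternative).

-- ===== PORT A =====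
-- string.ascii_lowercase (a string; by the type convention written as its character list)
def pvAsciiLowercase : List Char :=
  ['a','b','c','d','e','f','g','h','i','j','k','l','m','n','o','p','q','r','s','t','u','v','w','x','y','z']

-- the literal 'a an of the and or to for on' as its character list
def pvStopSrc : List Char :=
  ['a',' ','a','n',' ','o','f',' ','t','h','e',' ','a','n','d',' ','o','r',' ','t','o',' ','f','o','r',' ','o','n']

-- stoplist = set('a an of the and or to for on'.split())
def pvStoplistA : List (List Char) :=
  PySem.Set.ofList (PySem.Chars.split₀ pvStopSrc)

def str2words (s : String) : List String :=
  -- chars: the list of one-character strings built by A's loop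
  let chars : List (List Char) :=
    (PySem.Str.lower s).toList.foldl
      (fun acc c => if pvAsciiLowercase.contains c then acc ++ [[c]] else acc ++ [[' ']]) []
  let s2 : List Char := PySem.Chars.join [] chars   -- ''.join(chars)
  ((PySem.Chars.split₀ s2).filter (fun w => !(pvStoplistA.contains w))).map String.ofList

-- ===== PORT B =====
def pvIsLow (c : Char) : Bool := decide ('a' ≤ c) && decide (c ≤ 'z')

-- the set literal {'a', 'an', 'of', 'the', 'and', 'or', 'to', 'for', 'on'}
def pvStoplistB : List (List Char) :=
  PySem.Set.ofList [['a'], ['a','n'], ['o','f'], ['t','h','e'], ['a','n','d'],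
                    ['o','r'], ['t','o'], ['f','o','r'], ['o','n']]

-- Source B's while loop: at a letter, the inner while advances j to the end of the maximal
-- a-z run (takeWhile / dropWhile); the slice low[i:j] is kept unless it is a stopword;
-- at a non-letter the outer loop advances by one.
def pvScan : List Char → List (List Char)
  | [] => []
  | c :: rest =>
    if pvIsLow c then
      let w := c :: rest.takeWhile pvIsLow
      let r := pvScan (rest.dropWhile pvIsLow)
      if pvStoplistB.contains w then r else w :: r
    else pvScan rest
termination_by l => l.length
decreasing_by
  · have := List.length_dropWhile_le (p := pvIsLow) rest; simpa using Nat.lt_succ_of_le this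
  · simp

def str2words_alt (s : String) : List String :=
  (pvScan (PySem.Str.lower s).toList).map String.ofList

-- ===== PRECONDITION & SPEC =====
def Spec_str2words (s : String) (out : List String) : Prop := out = str2words_alt s
instance (s : String) (out : List String) : Decidable (Spec_str2words s out) := by unfold Spec_str2words; infer_instance

-- ===== CLAIM (what is proved, stated in full; the proofs are below) =====
def Claim_equal_str2words : Prop := ∀ (s : String), Dom_str2words s → Spec_str2words s (str2words s)

-- ===== LEMMAS AND PROOFS =====

-- the unfiltered maximal a-z runs of a char list (proof helper)
def pvRuns : List Char → List (List Char)
  | [] => []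
  | c :: rest =>
    if pvIsLow c then
      (c :: rest.takeWhile pvIsLow) :: pvRuns (rest.dropWhile pvIsLow)
    else pvRuns rest
termination_by l => l.length
decreasing_by
  · have := List.length_dropWhile_le (p := pvIsLow) rest; simpa using Nat.lt_succ_of_le this
  · simp

-- A's substituted character (letters kept, everything else a space)
def pvSub (c : Char) : Char := if pvIsLow c then c else ' '

lemma pvCharEq (c d : Char) : c = d ↔ c.toNat = d.toNat := by
  constructor
  · exact fun h => congrArg Char.toNat h
  · intro h; exact Char.ext (UInt32.toNat_inj.mp h)

lemma pvLowIff (c : Char) : pvIsLow c = true ↔ 97 ≤ c.toNat ∧ c.toNat ≤ 122 := by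
  simp only [pvIsLow, Bool.and_eq_true, decide_eq_true_eq, Char.le_def, UInt32.le_iff_toNat_le]
  exact Iff.rfl

lemma pvContains_eq (c : Char) : pvAsciiLowercase.contains c = pvIsLow c := by
  rw [Bool.eq_iff_iff, List.contains_iff_mem, pvLowIff]
  simp only [pvAsciiLowercase, List.mem_cons, List.not_mem_nil, or_false, pvCharEq]
  simp
  omega

lemma pvNotSpace {c : Char} (h : pvIsLow c = true) : PySem.Chars.isspace c = false := by
  rw [pvLowIff] at h
  rw [PySem.Chars.isspace]
  simp only [Bool.or_eq_false_iff, Bool.and_eq_false_iff, decide_eq_false_iff_not]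
  omega

lemma pv_go_inv (L : List Char) : ∀ (cur : List Char) (acc : List (List Char)),
    PySem.Chars.split₀.go (L.map pvSub) cur acc =
      acc.reverse ++ (if cur.isEmpty then pvRuns L
        else (cur.reverse ++ L.takeWhile pvIsLow) :: pvRuns (L.dropWhile pvIsLow)) := by
  induction L with
  | nil =>
    intro cur acc
    rw [List.map_nil, PySem.Chars.split₀.go]
    cases cur <;> simp [pvRuns]
  | cons c L ih =>
    intro cur acc
    rw [List.map_cons]
    by_cases hc : pvIsLow c = true
    · have hsub : pvSub c = c := by simp [pvSub, hc]
      rw [hsub, PySem.Chars.split₀.go, pvNotSpace hc]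
      simp only [Bool.false_eq_true, if_false]
      rw [ih (c :: cur) acc]
      cases cur <;> simp [pvRuns, hc]
    · have hsub : pvSub c = ' ' := by simp [pvSub, hc]
      have hsp : PySem.Chars.isspace ' ' = true := by decide
      rw [hsub, PySem.Chars.split₀.go, hsp]
      simp only [if_true]
      cases cur with
      | nil =>
        simp only [List.isEmpty_nil, if_true]
        rw [ih [] acc]
        simp [pvRuns, hc]
      | cons x xs =>
        simp only [List.isEmpty_cons, Bool.false_eq_true, if_false]
        rw [ih [] ((x :: xs).reverse :: acc)]
        simp [pvRuns, hc]

lemma pv_split_eq (L : List Char) :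
    PySem.Chars.split₀ (L.map pvSub) = pvRuns L := by
  rw [PySem.Chars.split₀, pv_go_inv L [] []]
  simp

lemma pv_scan_eq (L : List Char) :
    pvScan L = (pvRuns L).filter (fun w => !(pvStoplistB.contains w)) := by
  induction L using pvRuns.induct with
  | case1 => simp [pvScan, pvRuns]
  | case2 c rest hc ih =>
    rw [pvScan, pvRuns]
    simp only [hc, if_true]
    by_cases hw : pvStoplistB.contains (c :: rest.takeWhile pvIsLow) = true <;>
      simp [ih, List.filter_cons]
  | case3 c rest hc ih =>
    rw [pvScan, pvRuns]
    simp [hc, ih]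

lemma pv_stop_eq : pvStoplistA = pvStoplistB := by decide

-- ===== VERDICT (by name: the statement is the Claim_ definition above) =====
theorem str2words_spec : Claim_equal_str2words := by
  intro s _
  unfold Spec_str2words str2words str2words_alt
  set L := (PySem.Str.lower s).toList with hL
  have hfun : ∀ (acc : List (List Char)) (c : Char),
      (if pvAsciiLowercase.contains c then acc ++ [[c]] else acc ++ [[' ']]) =
        acc ++ [(if pvIsLow c then [c] else [' '])] := by
    intro acc c
    rw [pvContains_eq]
    by_cases h : pvIsLow c = true <;> simp [h]
  simp only [hfun]
  rw [PySem.List.foldl_append_singleton_eq_map]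
  have hmap : L.map (fun c => if pvIsLow c then [c] else [' ']) = (L.map pvSub).map (fun c => [c]) := by
    rw [List.map_map]
    have hcomp : ((fun c => [c]) ∘ pvSub) = fun c => if pvIsLow c then [c] else [' '] := by
      funext c; by_cases h : pvIsLow c = true <;> simp [pvSub, h]
    rw [hcomp]
  simp only [List.nil_append]
  rw [hmap, PySem.Chars.join_nil_singletons, pv_split_eq, pv_stop_eq, pv_scan_eq]
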